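-- pv_equiv track=rewrite | github.com/DaveDuan8/ECU-SIL | hpc/core/dicts.py | toint
-- ===== SOURCE A (Python) =====
-- def toint(text):
--     """
--     convert text to int, take only starting numbers
--
--     :param str text: input text
--     :return: int from text
--     :rtype: int
--     """
--     number = None
--     if text == "min":
--         return -2 ** 31
--     if text == "max":
--         return 2 ** 31 - 1
--
--     mul = 1
--     for i, k in enumerate(text):
--         try:
--             if i == 0 and k in ['-', '+']:
--                 mul = -1 if k == '-' else 1
--                 v = 0
--             else:
--                 v = int(k)
--             number = v if i == 0 else (10 * number + v)
--         except ValueError: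
--             break
--     return None if number is None else (mul * number)
-- ===== SOURCE B (Python) =====
-- def toint(text):
--     """Parse the integer prefix of text; 'min'/'max' name the 32-bit extremes.
--
--     Splits off an optional sign, collects the run of leading digits, and
--     combines them by positional weights (digit * 10**position) in one pass;
--     no digits means there is no number, so the result is None.
--     """
--     if text == "min":
--         return -2 ** 31
--     if text == "max":
--         return 2 ** 31 - 1
--     has_sign = text[:1] in ('+', '-')
--     digits = []
--     for c in (text[1:] if has_sign else text):
--         if not '0' <= c <= '9':
--             break
--         digits.append(c)
--     if not digits:
--         return None
--     value = sum((ord(c) - 48) * 10 ** (len(digits) - 1 - i)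
--                 for i, c in enumerate(digits))
--     return -value if text[:1] == '-' else value
-- ===== Notes on version B (the rewrite author's own statement) =====
-- stated objective: alternative
-- what changed: B splits off the sign and the leading digit run once and combines the digits by positional weights (sum of digit * 10^position), replacing A's per-character int() conversion inside a try/except with Horner accumulation and a mul flag.
-- intended difference: On strings that start with '+' or '-' not followed by a digit (e.g. '-', '-abc'), A returns 0 because its loop seeds number=0 on the sign before any digit is seen, while B returns None; a bare sign is not a number, so None is the intended value. — e.g. on toint("-"): A returns some 0, B returns none
import Mathlib
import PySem

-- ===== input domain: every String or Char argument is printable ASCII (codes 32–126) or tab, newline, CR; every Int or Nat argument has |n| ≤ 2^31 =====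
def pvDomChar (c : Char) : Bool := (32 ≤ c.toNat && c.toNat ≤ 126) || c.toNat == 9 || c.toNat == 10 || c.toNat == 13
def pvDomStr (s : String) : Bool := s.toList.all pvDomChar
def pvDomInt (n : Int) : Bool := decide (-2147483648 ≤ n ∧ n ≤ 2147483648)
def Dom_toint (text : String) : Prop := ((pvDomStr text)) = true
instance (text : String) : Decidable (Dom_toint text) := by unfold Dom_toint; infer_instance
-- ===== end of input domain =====

-- B splits off the sign and the leading digit run once and combines the digits by
-- positional weights instead of A's per-character int() inside a try/except Horner
-- loop; objective: alternative algorithm, similar cost. On a bare sign with no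
-- digit A returns 0, B returns None (stated as D_ below).

-- ===== PORT A =====
-- the for-loop of A: state (number, mul); `int(k)` is PySem.Int.ofChars? [k] (none = ValueError = break)
def tointLoop : List Char → Nat → Option Int → Int → Option Int × Int
  | [], _, number, mul => (number, mul)
  | k :: rest, i, number, mul =>
    if i = 0 ∧ (k = '-' ∨ k = '+') then
      tointLoop rest (i + 1) (some 0) (if k = '-' then -1 else 1)
    else
      match PySem.Int.ofChars? [k] with
      | none => (number, mul)                     -- except ValueError: break
      | some v =>
        tointLoop rest (i + 1) (some (if i = 0 then v else 10 * number.getD 0 + v)) mul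

def toint (text : String) : Option Int :=
  if text = "min" then some (-2 ^ 31)
  else if text = "max" then some (2 ^ 31 - 1)
  else
    let r := tointLoop text.toList 0 none 1
    match r.1 with
    | none => none
    | some n => some (r.2 * n)

-- ===== PORT B =====
-- the digit-collecting for-loop of B (append until first non-digit, then break)
def tointAltDigits : List Char → List Char
  | [] => []
  | c :: cs => if '0' ≤ c ∧ c ≤ '9' then c :: tointAltDigits cs else []

-- sum((ord(c) - 48) * 10 ** (len(digits) - 1 - i) for i, c in enumerate(digits))
def tointAltSum (digits : List Char) : Int :=
  (PySem.List.enumerate digits).foldl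
    (fun acc p => acc + ((p.2.toNat : Int) - 48) * 10 ^ ((digits.length : Int) - 1 - p.1).toNat) 0

def toint_alt (text : String) : Option Int :=
  if text = "min" then some (-2 ^ 31)
  else if text = "max" then some (2 ^ 31 - 1)
  else
    match text.toList with
    | [] => none                                  -- text[:1] = '' : no sign, no digits
    | c :: rest =>
      let body := if c = '+' ∨ c = '-' then rest else c :: rest
      let digits := tointAltDigits body
      if digits = [] then none
      else
        let value := tointAltSum digits
        some (if c = '-' then -value else value)

-- ===== PRECONDITION & SPEC =====
-- On strings that start with '+' or '-' not followed by a digit (e.g. '-', '-abc'),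
-- A returns 0 (its loop seeds number=0 on the sign), B returns None; a bare sign is
-- not a number, so None is the intended value.
def D_toint (text : String) : Prop :=
  text ≠ "min" ∧ text ≠ "max" ∧
  (text.toList.head? = some '+' ∨ text.toList.head? = some '-') ∧
  ((text.toList.drop 1).take 1).all (fun d => !(decide ('0' ≤ d) && decide (d ≤ '9'))) = true
instance (text : String) : Decidable (D_toint text) := by unfold D_toint; infer_instance

def Spec_toint (text : String) (out : Option Int) : Prop := ¬ D_toint text → out = toint_alt text
instance (text : String) (out : Option Int) : Decidable (Spec_toint text out) := by unfold Spec_toint; infer_instance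

def pvDiffWitness_toint : String := "-"
def pvDiffWitnessOut_toint : (Option Int) × (Option Int) := (some 0, none)

-- ===== CLAIM (what is proved, stated in full; the proofs are below) =====
def Claim_unchanged_toint : Prop := ∀ (text : String), Dom_toint text → Spec_toint text (toint text)
def Claim_changed_toint : Prop := Dom_toint (pvDiffWitness_toint) ∧ D_toint (pvDiffWitness_toint) ∧ toint (pvDiffWitness_toint) = pvDiffWitnessOut_toint.1 ∧ toint_alt (pvDiffWitness_toint) = pvDiffWitnessOut_toint.2 ∧ pvDiffWitnessOut_toint.1 ≠ pvDiffWitnessOut_toint.2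
def Claim_exact_toint : Prop := ∀ (text : String), Dom_toint text → D_toint text → toint text ≠ toint_alt text

-- ===== LEMMAS AND PROOFS =====

-- Horner accumulator that A's loop computes over the digit prefix (proof helper)
def pvHorner (acc : Int) (ds : List Char) : Int :=
  ds.foldl (fun a c => 10 * a + ((c.toNat : Int) - 48)) acc

-- int(k) on a single domain character: a digit gives its value, anything else ValueError
theorem pv_ofChars_single_code : ∀ n : Nat, n < 127 →
    PySem.Int.ofChars? [Char.ofNat n] =
      (if '0' ≤ Char.ofNat n ∧ Char.ofNat n ≤ '9' then some ((n : Int) - 48) else none) := by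
  decide

theorem pv_dom_lt (c : Char) (h : pvDomChar c = true) : c.toNat < 127 := by
  simp [pvDomChar] at h; omega

theorem pv_ofChars_single (c : Char) (h : pvDomChar c = true) :
    PySem.Int.ofChars? [c] =
      (if '0' ≤ c ∧ c ≤ '9' then some ((c.toNat : Int) - 48) else none) := by
  have := pv_ofChars_single_code c.toNat (pv_dom_lt c h)
  rwa [Char.ofNat_toNat] at this

-- A's loop from index ≥ 1 computes the Horner value of the digit prefix
theorem pv_loop_succ (cs : List Char) : ∀ (i : Nat) (acc mul : Int),
    cs.all pvDomChar = true →
    tointLoop cs (i + 1) (some acc) mul = (some (pvHorner acc (tointAltDigits cs)), mul) := by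
  induction cs with
  | nil => intro i acc mul _; simp [tointLoop, tointAltDigits, pvHorner]
  | cons c cs ih =>
    intro i acc mul hdom
    simp only [List.all_cons, Bool.and_eq_true] at hdom
    rw [tointLoop]
    simp only [Nat.succ_ne_zero, false_and, if_false]
    rw [pv_ofChars_single c hdom.1]
    by_cases hd : '0' ≤ c ∧ c ≤ '9'
    · rw [if_pos hd]
      simp only []
      rw [ih (i + 1) _ mul hdom.2]
      simp [tointAltDigits, hd, pvHorner]
    · rw [if_neg hd]
      simp [tointAltDigits, hd, pvHorner]

-- shifting the start of enumerate shifts the indices seen by a mapped function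
theorem pv_enumerate_shift {β : Type} (g : Int × Char → β) :
    ∀ (ds : List Char) (s : Int),
    (PySem.List.enumerate ds (s + 1)).map g
      = (PySem.List.enumerate ds s).map (fun p => g (p.1 + 1, p.2)) := by
  intro ds
  induction ds with
  | nil => intro s; simp [PySem.List.enumerate_nil]
  | cons c cs ih =>
    intro s
    rw [PySem.List.enumerate_cons, PySem.List.enumerate_cons]
    simp only [List.map_cons]
    rw [ih (s + 1)]

-- peeling the leading digit off B's positional sum
theorem pv_sum_cons (c : Char) (ds : List Char) :
    tointAltSum (c :: ds) = ((c.toNat : Int) - 48) * 10 ^ ds.length + tointAltSum ds := by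
  unfold tointAltSum
  rw [PySem.List.enumerate_cons]
  rw [PySem.List.foldl_add, PySem.List.foldl_add]
  have hs := pv_enumerate_shift
    (g := fun p => ((p.2.toNat : Int) - 48) * 10 ^ ((((c :: ds).length : Int)) - 1 - p.1).toNat) ds 0
  rw [List.map_cons, hs, List.sum_cons]
  dsimp only
  have hmaps :
      (PySem.List.enumerate ds 0).map
        (fun p => ((p.2.toNat : Int) - 48) * 10 ^ ((((c :: ds).length : Int)) - 1 - (p.1 + 1)).toNat)
      = (PySem.List.enumerate ds 0).map
        (fun p => ((p.2.toNat : Int) - 48) * 10 ^ ((ds.length : Int) - 1 - p.1).toNat) := by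
    apply List.map_congr_left
    intro p _
    have he : (((c :: ds).length : Int)) - 1 - (p.1 + 1) = (ds.length : Int) - 1 - p.1 := by
      simp only [List.length_cons]; push_cast; ring
    rw [he]
  rw [hmaps]
  have hexp : ((((c :: ds).length : Int)) - 1 - 0).toNat = ds.length := by
    simp only [List.length_cons]; omega
  rw [hexp]
  ring

-- Horner over a digit list equals acc·10^len plus B's positional sum
theorem pv_horner_eq (ds : List Char) : ∀ acc : Int,
    pvHorner acc ds = acc * 10 ^ ds.length + tointAltSum ds := by
  induction ds with
  | nil => intro acc; simp [pvHorner, tointAltSum, PySem.List.enumerate_nil]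
  | cons c cs ih =>
    intro acc
    have hh : pvHorner acc (c :: cs) = pvHorner (10 * acc + ((c.toNat : Int) - 48)) cs := rfl
    rw [hh, ih, pv_sum_cons]
    simp only [List.length_cons]
    ring

theorem pv_main (text : String) (hdom : Dom_toint text) (hnd : ¬ D_toint text) :
    toint text = toint_alt text := by
  unfold toint toint_alt
  by_cases h1 : text = "min"
  · simp [h1]
  by_cases h2 : text = "max"
  · simp [h2]
  simp only [h1, h2, if_false]
  have hall : text.toList.all pvDomChar = true := hdom
  cases hcs : text.toList with
  | nil => simp [tointLoop]
  | cons c rest =>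
    rw [hcs] at hall
    simp only [List.all_cons, Bool.and_eq_true] at hall
    by_cases hsign : c = '+' ∨ c = '-'
    · -- leading sign: A seeds number = 0, mul = ±1; ¬D_ forces a digit after the sign
      have hdig1 : ∃ d rest', rest = d :: rest' ∧ ('0' ≤ d ∧ d ≤ '9') := by
        have hh : text.toList.head? = some '+' ∨ text.toList.head? = some '-' := by
          rw [hcs]; rcases hsign with h | h <;> [left; right] <;> simp [h]
        have hnall : ¬ (((text.toList.drop 1).take 1).all
            (fun d => !(decide ('0' ≤ d) && decide (d ≤ '9'))) = true) :=
          fun hcon => hnd ⟨h1, h2, hh, hcon⟩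
        simp only [List.all_eq_true, not_forall, Bool.not_eq_true, Bool.not_eq_false',
          Bool.and_eq_true, decide_eq_true_eq] at hnall
        obtain ⟨d, hdmem, hdd⟩ := hnall
        rw [hcs] at hdmem
        cases rest with
        | nil => simp at hdmem
        | cons d' rest' =>
          simp only [List.drop_succ_cons, List.drop_zero, List.take_succ_cons,
            List.take_zero, List.mem_cons, List.not_mem_nil, or_false] at hdmem
          exact ⟨d', rest', rfl, hdmem ▸ hdd⟩
      obtain ⟨d, rest', hrest, hdd⟩ := hdig1
      rw [tointLoop]
      have hsign' : c = '-' ∨ c = '+' := hsign.symm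
      rw [if_pos (⟨rfl, hsign'⟩ : (0 : Nat) = 0 ∧ (c = '-' ∨ c = '+'))]
      rw [pv_loop_succ rest 0 0 _ hall.2]
      rw [pv_horner_eq]
      simp only [zero_mul, zero_add]
      rw [if_pos hsign]
      have hne : tointAltDigits rest ≠ [] := by
        rw [hrest]; simp [tointAltDigits, hdd]
      rw [if_neg hne]
      by_cases hneg : c = '-'
      · simp [hneg]
      · simp [hneg]
    · -- no sign: first character decides between None and a digit run
      rw [tointLoop]
      have hns : ¬ ((0 : Nat) = 0 ∧ (c = '-' ∨ c = '+')) := by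
        intro h; exact hsign (h.2.symm)
      rw [if_neg hns, pv_ofChars_single c hall.1]
      by_cases hd : '0' ≤ c ∧ c ≤ '9'
      · rw [if_pos hd]
        simp only []
        rw [pv_loop_succ rest 0 _ 1 hall.2]
        have hdig : tointAltDigits (c :: rest) = c :: tointAltDigits rest := by
          simp [tointAltDigits, hd]
        have hcm : ¬ c = '-' := by
          intro h; exact hsign (Or.inr h)
        rw [if_neg hsign, hdig, if_neg (List.cons_ne_nil _ _), if_neg hcm]
        simp only [if_true, one_mul]
        congr 1
        rw [pv_horner_eq, pv_sum_cons]
      · -- non-digit first character: both sides give None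
        rw [if_neg hd]
        have hdig : tointAltDigits (c :: rest) = [] := by
          simp [tointAltDigits, hd]
        simp [hsign, hdig]

-- inside D_, A returns some 0 while B returns none
theorem pv_exact (text : String) (hdom : Dom_toint text) (hD : D_toint text) :
    toint text ≠ toint_alt text := by
  obtain ⟨h1, h2, hhd, hnod⟩ := hD
  have hall : text.toList.all pvDomChar = true := hdom
  unfold toint toint_alt
  simp only [h1, h2, if_false]
  cases hcs : text.toList with
  | nil => rw [hcs] at hhd; simp at hhd
  | cons c rest =>
    rw [hcs] at hhd hnod hall
    simp only [List.all_cons, Bool.and_eq_true] at hall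
    have hsign : c = '+' ∨ c = '-' := by
      rcases hhd with h | h <;> [left; right] <;> simpa using h
    -- A's side: loop gives (some 0, mul)
    have hA : tointLoop (c :: rest) 0 none 1 = (some 0, if c = '-' then -1 else 1) := by
      rw [tointLoop]
      rw [if_pos (⟨rfl, hsign.symm⟩ : (0 : Nat) = 0 ∧ (c = '-' ∨ c = '+'))]
      cases rest with
      | nil => simp [tointLoop]
      | cons d rest' =>
        rw [List.all_eq_true] at hnod
        have hdd : ¬ ('0' ≤ d ∧ d ≤ '9') := by
          have hlt := hnod d (by simp)
          simp at hlt
          rcases hlt with h | h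
          · exact fun hc => absurd hc.1 (not_le.mpr h)
          · exact fun hc => absurd hc.2 (not_le.mpr h)
        rw [tointLoop]
        simp only [Nat.succ_ne_zero, false_and, if_false]
        rw [pv_ofChars_single d (by simp only [List.all_cons, Bool.and_eq_true] at hall; exact hall.2.1)]
        rw [if_neg hdd]
    have hB : tointAltDigits (if c = '+' ∨ c = '-' then rest else c :: rest) = [] := by
      rw [if_pos hsign]
      cases rest with
      | nil => simp [tointAltDigits]
      | cons d rest' =>
        rw [List.all_eq_true] at hnod
        have hdd : ¬ ('0' ≤ d ∧ d ≤ '9') := by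
          have hlt := hnod d (by simp)
          simp at hlt
          rcases hlt with h | h
          · exact fun hc => absurd hc.1 (not_le.mpr h)
          · exact fun hc => absurd hc.2 (not_le.mpr h)
        simp [tointAltDigits, hdd]
    rw [hA]
    simp [hB]

-- ===== VERDICT (by name: the statement is the Claim_ definition above) =====
theorem toint_spec : Claim_unchanged_toint := by
  intro text hdom
  unfold Spec_toint
  intro hnd
  exact pv_main text hdom hnd

set_option maxRecDepth 100000 in
theorem toint_changed : Claim_changed_toint := by
  unfold Claim_changed_toint; decide

theorem toint_tight : Claim_exact_toint := by
  intro text hdom hD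
  exact pv_exact text hdom hD
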